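-- pv_equiv track=rewrite | github.com/Mironika12/aois | lab2/logic/minimization_calc_method.py | remove_covered_columns
-- ===== SOURCE A (Python) =====
-- def remove_covered_columns(table, selected_rows):
--     cols = set()
--
--     for r in selected_rows:
--         for j, val in enumerate(table[r]):
--             if val == 1:
--                 cols.add(j)
--
--     new_table = []
--
--     for row in table:
--         new_row = [val for j, val in enumerate(row) if j not in cols]
--         new_table.append(new_row)
--
--     return new_table
-- ===== SOURCE B (Python) =====
-- def _mask(row, base):
--     out = []
--     it = iter(base)
--     for v in row:
--         if next(it, None) != 1:
--             out.append(v)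
--     return out
--
--
-- def remove_covered_columns(table, selected_rows):
--     cur = table
--     for r in selected_rows:
--         base = cur[r]
--         cur = [_mask(row, base) for row in cur]
--     return cur
-- ===== Notes on version B (the rewrite author's own statement) =====
-- stated objective: alternative
-- what changed: B keeps no covered-column index set: it rewrites the whole table once per selected row, walking each row in lockstep with that selected row's current (already-shrunken) contents and dropping the positions holding a 1 — iterative column elimination instead of A's one-shot union-set filter.
import Mathlib
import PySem

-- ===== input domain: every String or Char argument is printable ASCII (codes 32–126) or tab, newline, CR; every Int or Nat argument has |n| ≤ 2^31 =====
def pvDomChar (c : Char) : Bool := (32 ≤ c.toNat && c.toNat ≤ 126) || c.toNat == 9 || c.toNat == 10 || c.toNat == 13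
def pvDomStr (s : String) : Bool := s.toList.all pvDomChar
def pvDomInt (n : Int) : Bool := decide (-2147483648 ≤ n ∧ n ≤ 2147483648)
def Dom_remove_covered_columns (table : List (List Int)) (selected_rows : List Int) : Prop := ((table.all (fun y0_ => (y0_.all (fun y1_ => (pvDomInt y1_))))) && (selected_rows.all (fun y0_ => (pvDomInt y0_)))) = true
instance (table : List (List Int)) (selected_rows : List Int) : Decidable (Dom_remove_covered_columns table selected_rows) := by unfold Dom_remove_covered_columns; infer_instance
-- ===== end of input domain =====

-- B keeps no covered-column set at all: it rewrites the whole table once per selected row,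
-- dropping from every row the positions where that selected row's current contents hold a 1
-- (iterative column elimination) — an alternative decomposition, not claimed faster.

-- ===== PORT A =====
-- table[r] is ported as (pyGet? table r).getD []; the .getD [] branch is only reached where
-- Python raises IndexError, i.e. outside Pre_.
def remove_covered_columns (table : List (List Int)) (selected_rows : List Int) : List (List Int) :=
  let cols : PySem.Set Int :=
    selected_rows.foldl (fun cols r =>
      (PySem.List.enumerate ((PySem.List.pyGet? table r).getD [])).foldl
        (fun cols jv => if jv.2 = 1 then PySem.Set.add cols jv.1 else cols) cols) []
  table.foldl (fun new_table row =>
    new_table ++ [(PySem.List.enumerate row).foldl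
      (fun new_row jv => if !(PySem.Set.contains cols jv.1) then new_row ++ [jv.2] else new_row) []]) []

-- ===== PORT B =====
-- _mask walks row and base in lockstep (Python: iter(base)/next with default None);
-- past the end of base nothing is one, so the element is kept.
def pvMaskRow : List Int → List Int → List Int
  | [], _ => []
  | v :: row, [] => v :: pvMaskRow row []
  | v :: row, b :: base => if b = 1 then pvMaskRow row base else v :: pvMaskRow row base

-- same convention for cur[r]: (pyGet? cur r).getD [], reached only outside Pre_.
def remove_covered_columns_alt (table : List (List Int)) (selected_rows : List Int) : List (List Int) :=
  selected_rows.foldl (fun cur r =>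
    let base := (PySem.List.pyGet? cur r).getD []
    cur.map (fun row => pvMaskRow row base)) table

-- ===== PRECONDITION & SPEC =====
-- Pre_ excludes exactly the inputs where Python A raises IndexError on table[r].
def Pre_remove_covered_columns (table : List (List Int)) (selected_rows : List Int) : Prop :=
  ∀ r ∈ selected_rows, PySem.Raise.InRange table.length r
instance (table : List (List Int)) (selected_rows : List Int) : Decidable (Pre_remove_covered_columns table selected_rows) := by unfold Pre_remove_covered_columns; infer_instance

def pvWitness_remove_covered_columns : List (List Int) × List Int := ([[1, 0], [0, 1]], [0])

def Spec_remove_covered_columns (table : List (List Int)) (selected_rows : List Int) (out : List (List Int)) : Prop := out = remove_covered_columns_alt table selected_rows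
instance (table : List (List Int)) (selected_rows : List Int) (out : List (List Int)) : Decidable (Spec_remove_covered_columns table selected_rows out) := by unfold Spec_remove_covered_columns; infer_instance

-- ===== CLAIM (what is proved, stated in full; the proofs are below) =====
def Claim_equal_remove_covered_columns : Prop := ∀ (table : List (List Int)) (selected_rows : List Int), Dom_remove_covered_columns table selected_rows → Pre_remove_covered_columns table selected_rows → Spec_remove_covered_columns table selected_rows (remove_covered_columns table selected_rows)

-- ===== LEMMAS AND PROOFS =====

-- drop the entries of row at the positions where the predicate (on the position) is true
def pvFmask : (Nat → Bool) → List Int → List Int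
  | _, [] => []
  | p, v :: row => (if p 0 then [] else [v]) ++ pvFmask (fun k => p (k + 1)) row

-- "base has a 1 at position k" (false past the end of base)
def pvOneAt : List Int → Nat → Bool
  | [], _ => false
  | u :: _, 0 => u == 1
  | _ :: b, k + 1 => pvOneAt b k

theorem pvFmask_congr (p q : Nat → Bool) (row : List Int) (h : ∀ k, p k = q k) :
    pvFmask p row = pvFmask q row := by
  induction row generalizing p q with
  | nil => rfl
  | cons v row ih => simp only [pvFmask, h 0, ih _ _ (fun k => h (k + 1))]

theorem pvFmask_false (row : List Int) : pvFmask (fun _ => false) row = row := by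
  induction row with
  | nil => rfl
  | cons v row ih => simp [pvFmask, ih]

theorem pvMaskRow_nil_right (row : List Int) : pvMaskRow row [] = row := by
  induction row with
  | nil => rfl
  | cons v row ih => simp [pvMaskRow, ih]

-- KEY: masking a p-filtered row against the p-filtered base removes exactly p ∪ (ones of base)
theorem pvMask_fmask (row : List Int) (b : List Int) (p : Nat → Bool) :
    pvMaskRow (pvFmask p row) (pvFmask p b) =
      pvFmask (fun k => p k || pvOneAt b k) row := by
  induction row generalizing b p with
  | nil => simp [pvFmask, pvMaskRow]
  | cons v row ih =>
    cases b with
    | nil =>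
      rw [show pvFmask p ([] : List Int) = [] from rfl, pvMaskRow_nil_right]
      exact pvFmask_congr _ _ _ (fun k => by simp [pvOneAt])
    | cons u b =>
      by_cases hp : p 0
      · simp only [pvFmask, pvOneAt, hp, if_true, Bool.true_or, List.nil_append, ih]
      · by_cases hu : u = 1
        · simp [pvFmask, pvMaskRow, pvOneAt, hp, hu, ih]
        · simp [pvFmask, pvMaskRow, pvOneAt, hp, hu, ih]

theorem pvPyGet?_map (l : List (List Int)) (f : List Int → List Int) (i : Int) :
    PySem.List.pyGet? (l.map f) i = (PySem.List.pyGet? l i).map f := by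
  simp only [PySem.List.pyGet?, List.length_map]
  cases PySem.List.pyIdx? l.length i <;> simp

-- the covered predicate after A's scan of the selected rows
def pvCov (table : List (List Int)) (sel : List Int) (k : Nat) : Bool :=
  sel.any (fun r => pvOneAt ((PySem.List.pyGet? table r).getD []) k)

-- B's fold, peeled one selected row at a time over a p-filtered table
theorem pvB_inv (table : List (List Int)) (sel : List Int) (p : Nat → Bool) :
    sel.foldl (fun cur r =>
        let base := (PySem.List.pyGet? cur r).getD []
        cur.map (fun row => pvMaskRow row base)) (table.map (pvFmask p)) =
      table.map (pvFmask (fun k => p k || pvCov table sel k)) := by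
  induction sel generalizing p with
  | nil =>
    exact List.map_congr_left fun row _ =>
      pvFmask_congr _ _ _ (fun k => by simp [pvCov])
  | cons r sel ih =>
    simp only [List.foldl_cons]
    have hbase : (PySem.List.pyGet? (table.map (pvFmask p)) r).getD [] =
        pvFmask p ((PySem.List.pyGet? table r).getD []) := by
      rw [pvPyGet?_map]
      cases PySem.List.pyGet? table r <;> simp [pvFmask]
    rw [hbase]
    have hstep : (table.map (pvFmask p)).map
        (fun row => pvMaskRow row (pvFmask p ((PySem.List.pyGet? table r).getD []))) =
        table.map (pvFmask (fun k => p k || pvOneAt ((PySem.List.pyGet? table r).getD []) k)) := by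
      rw [List.map_map]
      exact List.map_congr_left fun row _ => pvMask_fmask row _ p
    rw [hstep, ih]
    exact List.map_congr_left fun row _ =>
      pvFmask_congr _ _ _ (fun k => by simp [pvCov, Bool.or_assoc])

-- membership after A's inner conditional-add fold over one enumerated row
theorem pv_mem_inner (l : List (Int × Int)) (s : PySem.Set Int) (j : Int) :
    j ∈ l.foldl (fun s jv => if jv.2 = 1 then PySem.Set.add s jv.1 else s) s ↔
      j ∈ s ∨ ∃ jv ∈ l, jv.2 = 1 ∧ j = jv.1 := by
  induction l generalizing s with
  | nil => simp
  | cons hd tl ih =>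
    simp only [List.foldl_cons, ih]
    by_cases h : hd.2 = 1 <;> simp [h, PySem.Set.mem_add] <;> tauto

-- membership after A's outer fold over selected_rows
theorem pv_mem_outer (table : List (List Int)) (sel : List Int) (s : PySem.Set Int) (j : Int) :
    j ∈ sel.foldl (fun cols r =>
        (PySem.List.enumerate ((PySem.List.pyGet? table r).getD [])).foldl
          (fun cols jv => if jv.2 = 1 then PySem.Set.add cols jv.1 else cols) cols) s ↔
      j ∈ s ∨ ∃ r ∈ sel, ∃ jv ∈ PySem.List.enumerate ((PySem.List.pyGet? table r).getD []),
        jv.2 = 1 ∧ j = jv.1 := by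
  induction sel generalizing s with
  | nil => simp
  | cons hd tl ih =>
    simp only [List.foldl_cons, ih, pv_mem_inner, List.exists_mem_cons_iff]
    exact or_assoc

-- pvOneAt in terms of getD
theorem pvOneAt_eq (b : List Int) (k : Nat) :
    pvOneAt b k = (decide (k < b.length) && (b.getD k 0 == 1)) := by
  induction b generalizing k with
  | nil => simp [pvOneAt]
  | cons u b ih => cases k <;> simp [pvOneAt, ih]

-- A's covered-set membership at a Nat position equals pvCov
theorem pv_cov (table : List (List Int)) (sel : List Int) (k : Nat) :
    PySem.Set.contains
      (sel.foldl (fun cols r =>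
        (PySem.List.enumerate ((PySem.List.pyGet? table r).getD [])).foldl
          (fun cols jv => if jv.2 = 1 then PySem.Set.add cols jv.1 else cols) cols)
        ([] : PySem.Set Int)) ((k : Nat) : Int) = pvCov table sel k := by
  rw [Bool.eq_iff_iff, PySem.Set.contains_iff, pv_mem_outer]
  simp only [List.not_mem_nil, false_or, pvCov, List.any_eq_true]
  constructor
  · rintro ⟨r, hr, jv, hjv, h1, hk⟩
    obtain ⟨m, hm, rfl⟩ := (PySem.List.mem_enumerate_iff _ _ _).1 hjv
    simp only [zero_add] at hk h1
    have hkm : k = m := by exact_mod_cast hk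
    subst hkm
    refine ⟨r, hr, ?_⟩
    rw [pvOneAt_eq]
    simp [hm, h1]
  · rintro ⟨r, hr, h1⟩
    rw [pvOneAt_eq, Bool.and_eq_true, decide_eq_true_eq, beq_iff_eq] at h1
    refine ⟨r, hr, ((k : Int), ((PySem.List.pyGet? table r).getD []).getD k 0), ?_, h1.2, rfl⟩
    rw [PySem.List.mem_enumerate_iff]
    exact ⟨k, h1.1, by simp [List.getElem?_eq_getElem h1.1]⟩

-- A's per-row enumerate/filter loop is pvFmask of the covered predicate
theorem pvEnumFilter (row : List Int) (q : Int → Bool) (s : Int) :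
    ((PySem.List.enumerate row s).filter (fun jv => q jv.1)).map Prod.snd =
      pvFmask (fun k => !(q (s + (k : Nat)))) row := by
  induction row generalizing s with
  | nil => simp [pvFmask, PySem.List.enumerate_nil]
  | cons v row ih =>
    rw [PySem.List.enumerate_cons]
    by_cases hq : q s
    · have h0 : (!(q (s + ((0 : Nat) : Int)))) = false := by simpa using hq
      simp only [List.filter_cons, hq, if_true, List.map_cons, pvFmask, h0, Bool.false_eq_true,
        if_false, List.singleton_append, ih]
      exact congrArg _ (pvFmask_congr _ _ _ (fun k => by
        congr 1; congr 1; push_cast; ring))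
    · have h0 : (!(q (s + ((0 : Nat) : Int)))) = true := by simpa using hq
      simp only [List.filter_cons, hq, Bool.false_eq_true, if_false, pvFmask, h0, if_true,
        List.nil_append, ih]
      exact pvFmask_congr _ _ _ (fun k => by
        congr 1; congr 1; push_cast; ring)

-- ===== VERDICT (by name: the statement is the Claim_ definition above) =====
theorem remove_covered_columns_spec : Claim_equal_remove_covered_columns := by
  intro table sel _ _
  show _ = _
  simp only [remove_covered_columns, remove_covered_columns_alt]
  set cols := sel.foldl (fun cols r =>
    (PySem.List.enumerate ((PySem.List.pyGet? table r).getD [])).foldl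
      (fun cols jv => if jv.2 = 1 then PySem.Set.add cols jv.1 else cols) cols)
    ([] : PySem.Set Int) with hcols
  -- A side: set-filter → pvFmask (pvCov)
  have hA : table.foldl (fun new_table row =>
      new_table ++ [(PySem.List.enumerate row).foldl
        (fun new_row jv => if !(PySem.Set.contains cols jv.1) then new_row ++ [jv.2] else new_row) []]) [] =
      table.map (pvFmask (pvCov table sel)) := by
    rw [PySem.List.foldl_append_singleton_eq_map, List.nil_append]
    apply List.map_congr_left
    intro row _
    rw [PySem.List.foldl_append_if, List.nil_append,
      pvEnumFilter row (fun j => !(PySem.Set.contains cols j)) 0]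
    exact pvFmask_congr _ _ _ (fun k => by
      rw [Bool.not_not, zero_add, hcols, pv_cov])
  -- B side: fold of masks → pvFmask (pvCov)
  have hid : table.map (pvFmask (fun _ => false)) = table := by
    rw [List.map_congr_left (fun row _ => pvFmask_false row)]
    exact List.map_id _
  rw [hA]
  conv_rhs => rw [← hid]
  rw [pvB_inv]
  exact List.map_congr_left fun row _ => pvFmask_congr _ _ _ (fun k => by simp)
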